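-- pv_equiv track=rewrite | github.com/CristinaZhangchan/Leetcode-algorithm | binarySearch.py | search
-- ===== SOURCE A (Python) =====
-- def search(nums, target):
--     """
--     :type nums: List[int]
--     :type target: int
--     :rtype: int
--     """
--     left, right = 0, len(nums)
--     nums.sort()
--
--     while left < right:
--         middle = left + (right - left) // 2
--
--         if nums[middle] < target:
--             left = middle + 1
--         elif nums[middle] > target:
--             right = middle
--         else:
--             return middle
--
--     return -1
-- ===== SOURCE B (Python) =====
-- def search(nums, target):
--     """
--     :type nums: List[int]
--     :type target: int
--     :rtype: int
--     """
--     nums.sort()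
--     for i, x in enumerate(nums):
--         if x == target:
--             return i
--         if x > target:
--             return -1
--     return -1
-- ===== Notes on version B (the rewrite author's own statement) =====
-- stated objective: simpler
-- what changed: B replaces A's binary-search while-loop over an index window by a single left-to-right scan of the sorted list that returns the first index equal to target (stopping early once an element exceeds it).
-- outside the precondition, e.g. on search([1, 1], 1): A returns 1, B returns 0
import Mathlib
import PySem

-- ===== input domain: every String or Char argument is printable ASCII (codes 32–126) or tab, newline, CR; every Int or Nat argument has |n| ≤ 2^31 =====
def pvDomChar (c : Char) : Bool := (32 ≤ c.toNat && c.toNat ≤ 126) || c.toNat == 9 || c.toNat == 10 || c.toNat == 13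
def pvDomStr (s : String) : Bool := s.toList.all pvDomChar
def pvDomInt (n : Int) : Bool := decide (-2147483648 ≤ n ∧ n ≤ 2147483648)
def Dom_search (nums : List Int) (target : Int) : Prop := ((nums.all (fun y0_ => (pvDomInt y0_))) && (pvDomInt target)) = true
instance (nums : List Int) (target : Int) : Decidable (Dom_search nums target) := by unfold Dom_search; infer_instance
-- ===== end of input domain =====

-- B replaces A's binary-search while-loop by a single linear scan of the sorted
-- list (simpler); equivalence of the RETURN VALUE only: A sorts `nums` in place,
-- and B performs the same in-place sort.

-- ===== PORT A =====
-- A's while-loop as recursion on the window (left, right)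
def searchLoop (s : List Int) (target : Int) (left right : Int) : Int :=
  if h : left < right then
    let middle := left + PySem.Int.floordiv (right - left) 2
    let v := PySem.List.pyGetD s middle 0
    if v < target then searchLoop s target (middle + 1) right
    else if v > target then searchLoop s target left middle
    else middle
  else -1
termination_by (right - left).toNat
decreasing_by
  · have h2 : PySem.Int.floordiv (right - left) 2 = (right - left) / 2 :=
      PySem.Int.floordiv_eq_ediv_of_pos (by omega)
    simp only [h2]; omega
  · have h2 : PySem.Int.floordiv (right - left) 2 = (right - left) / 2 :=
      PySem.Int.floordiv_eq_ediv_of_pos (by omega)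
    simp only [h2]; omega

def search (nums : List Int) (target : Int) : Int :=
  searchLoop (PySem.List.sorted nums (fun x => x) false) target 0 (nums.length : Int)

-- ===== PORT B =====
-- B's for-loop over enumerate(nums): first hit wins, early -1 once past target
def scanLoop (target : Int) (i : Int) : List Int → Int
  | [] => -1
  | x :: rest =>
    if x = target then i
    else if x > target then -1
    else scanLoop target (i + 1) rest

def search_alt (nums : List Int) (target : Int) : Int :=
  scanLoop target 0 (PySem.List.sorted nums (fun x => x) false)

-- ===== PRECONDITION & SPEC =====
-- Pre_ excludes lists in which `target` occurs more than once: there the index A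
-- returns among the duplicate occurrences is an accident of the binary-search
-- path (both A's and B's choices are defensible); B returns the leftmost one.
def Pre_search (nums : List Int) (target : Int) : Prop := nums.count target ≤ 1
instance (nums : List Int) (target : Int) : Decidable (Pre_search nums target) := by
  unfold Pre_search; infer_instance

def pvWitness_search : List Int × Int := ([5, 1, 3], 3)

def Spec_search (nums : List Int) (target : Int) (out : Int) : Prop := out = search_alt nums target
instance (nums : List Int) (target : Int) (out : Int) : Decidable (Spec_search nums target out) := by
  unfold Spec_search; infer_instance

-- ===== CLAIM (what is proved, stated in full; the proofs are below) =====
def Claim_equal_search : Prop := ∀ (nums : List Int) (target : Int), Dom_search nums target → Pre_search nums target → Spec_search nums target (search nums target)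

-- ===== LEMMAS AND PROOFS =====

-- a list containing a value at most once has at most one index holding it
theorem count_le_one_uniq (s : List Int) (t : Int) : s.count t ≤ 1 →
    ∀ i j, (hi : i < s.length) → (hj : j < s.length) → s[i] = t → s[j] = t → i = j := by
  induction s with
  | nil => intro _ i j hi; simp at hi
  | cons x rest ih =>
    intro hc i j hi hj hit hjt
    have hc' : rest.count t + (if x = t then 1 else 0) ≤ 1 := by
      simpa [List.count_cons] using hc
    match i, j with
    | 0, 0 => rfl
    | 0, j+1 =>
      exfalso
      simp at hit hjt
      have : t ∈ rest := by subst hjt; exact List.getElem_mem _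
      have : 0 < rest.count t := List.count_pos_iff.mpr this
      simp [hit] at hc'; omega
    | i+1, 0 =>
      exfalso
      simp at hit hjt
      have : t ∈ rest := by subst hit; exact List.getElem_mem _
      have : 0 < rest.count t := List.count_pos_iff.mpr this
      simp [hjt] at hc'; omega
    | i+1, j+1 =>
      have := ih (by omega) i j (by simpa using hi) (by simpa using hj)
        (by simpa using hit) (by simpa using hjt)
      omega

-- B's scan over a sorted list returns (offset +) the index of the first occurrence
theorem scanLoop_spec (s : List Int) (t : Int) : ∀ (i : Int), s.Pairwise (· ≤ ·) →
    scanLoop t i s = if t ∈ s then i + (s.idxOf t : Int) else -1 := by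
  induction s with
  | nil => intro i _; simp [scanLoop]
  | cons x rest ih =>
    intro i hp
    have hx : ∀ y ∈ rest, x ≤ y := (List.pairwise_cons.mp hp).1
    have hp' : rest.Pairwise (· ≤ ·) := (List.pairwise_cons.mp hp).2
    by_cases hxt : x = t
    · subst hxt
      simp [scanLoop, List.idxOf_cons_self]
    · by_cases hgt : x > t
      · have hnm : t ∉ x :: rest := by
          intro hm
          rcases List.mem_cons.mp hm with h | h
          · exact hxt h.symm
          · exact absurd (hx t h) (by omega)
        simp [scanLoop, hxt, hgt, hnm]
      · have : scanLoop t i (x :: rest) = scanLoop t (i + 1) rest := by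
          simp [scanLoop, hxt, hgt]
        rw [this, ih (i + 1) hp']
        by_cases hm : t ∈ rest
        · have hmem : t ∈ x :: rest := List.mem_cons_of_mem _ hm
          rw [if_pos hm, if_pos hmem, List.idxOf_cons_ne _ hxt]
          push_cast; ring
        · have hnm : t ∉ x :: rest := by
            intro hc
            rcases List.mem_cons.mp hc with h | h
            · exact hxt h.symm
            · exact hm h
          simp [hm, hnm]

-- A's window loop on a sorted list with a unique occurrence returns that index
theorem searchLoop_spec (s : List Int) (t : Int) : ∀ (n : Nat) (left right : Int),
    s.Pairwise (· ≤ ·) → s.count t ≤ 1 → 0 ≤ left → right ≤ (s.length : Int) →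
    (∀ j : Nat, (hj : j < s.length) → s[j] = t → left ≤ (j : Int) ∧ (j : Int) < right) →
    (right - left).toNat ≤ n →
    searchLoop s t left right = if t ∈ s then (s.idxOf t : Int) else -1 := by
  intro n
  induction n with
  | zero =>
    intro left right _ _ _ _ hwin hfuel
    rw [searchLoop, dif_neg (by omega)]
    split_ifs with hm
    · exfalso
      have hlt : s.idxOf t < s.length := List.idxOf_lt_length_iff.mpr hm
      have := hwin (s.idxOf t) hlt (List.getElem_idxOf hlt)
      omega
    · rfl
  | succ n ih =>
    intro left right hp hc hl hr hwin hfuel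
    by_cases hlr : left < right
    · rw [searchLoop, dif_pos hlr]
      have h2 : PySem.Int.floordiv (right - left) 2 = (right - left) / 2 :=
        PySem.Int.floordiv_eq_ediv_of_pos (by omega)
      simp only [h2]
      set m : Int := left + (right - left) / 2 with hmdef
      have hm1 : left ≤ m := by omega
      have hm2 : m < right := by omega
      have hml : m.toNat < s.length := by omega
      have hv : PySem.List.pyGetD s m 0 = s[m.toNat] :=
        PySem.List.pyGetD_eq_getElem s 0 (by omega) (by omega)
      rw [hv]
      by_cases hlt : s[m.toNat] < t
      · -- s[m] < t : recurse into the right half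
        rw [if_pos hlt]
        refine ih (m + 1) right hp hc (by omega) hr ?_ (by omega)
        intro j hj hjt
        have hw := hwin j hj hjt
        have hjm : m.toNat < j := by
          by_contra hle
          push Not at hle
          rcases Nat.lt_or_ge j m.toNat with hlt' | hge
          · have := List.pairwise_iff_getElem.mp hp j m.toNat hj hml hlt'
            omega
          · have hje : j = m.toNat := by omega
            subst hje; omega
        omega
      · rw [if_neg hlt]
        by_cases hgt : s[m.toNat] > t
        · -- s[m] > t : recurse into the left half
          rw [if_pos hgt]
          refine ih left m hp hc hl (by omega) ?_ (by omega)
          intro j hj hjt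
          have hw := hwin j hj hjt
          have hjm : j < m.toNat := by
            by_contra hle
            push Not at hle
            rcases Nat.lt_or_ge m.toNat j with hlt' | hge
            · have := List.pairwise_iff_getElem.mp hp m.toNat j hml hj hlt'
              omega
            · have hje : j = m.toNat := by omega
              subst hje; omega
          omega
        · -- s[m] = t : found
          rw [if_neg hgt]
          have hvt : s[m.toNat] = t := by omega
          have hmem : t ∈ s := hvt ▸ List.getElem_mem _
          rw [if_pos hmem]
          have hix : s.idxOf t < s.length := List.idxOf_lt_length_iff.mpr hmem
          have := count_le_one_uniq s t hc (s.idxOf t) m.toNat hix hml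
            (List.getElem_idxOf hix) hvt
          omega
    · rw [searchLoop, dif_neg hlr]
      split_ifs with hm
      · exfalso
        have hix : s.idxOf t < s.length := List.idxOf_lt_length_iff.mpr hm
        have := hwin (s.idxOf t) hix (List.getElem_idxOf hix)
        omega
      · rfl

-- ===== VERDICT (by name: the statement is the Claim_ definition above) =====
theorem search_spec : Claim_equal_search := by
  intro nums target _ hpre
  unfold Spec_search search search_alt
  set s := PySem.List.sorted nums (fun x => x) false with hs
  have hp : s.Pairwise (· ≤ ·) := by
    simpa using PySem.List.sorted_pairwise nums (fun x => x)
  have hperm : s.Perm nums := PySem.List.sorted_perm nums (fun x => x) false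
  have hc : s.count target ≤ 1 := by
    rw [hperm.count_eq]; exact hpre
  have hlen : s.length = nums.length := hperm.length_eq
  rw [searchLoop_spec s target s.length 0 (nums.length : Int) hp hc (by omega)
    (by omega) (fun j hj _ => by omega) (by omega)]
  rw [scanLoop_spec s target 0 hp]
  split_ifs <;> simp
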